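-- pv_equiv track=rewrite | github.com/TjFournier/TjFournier.github.io | hw_01.py | compile_code_inline
-- ===== SOURCE A (Python) =====
-- def compile_code_inline(line):
--     '''
--     Add <code> tags.
--     HINT:
--     This function is like the italics functions because inline code uses only a single character as a delimiter.
--     It is more complex, however, because inline code blocks can contain valid HTML inside of them,
--     but we do not want that HTML to get rendered as HTML.
--     Therefore, we must convert the `<` and `>` signs into `&lt;` and `&gt;` respectively.
--     >>> compile_code_inline('You can use backticks like this (`1+2`) to include code in the middle of text.')
--     'You can use backticks like this (<code>1+2</code>) to include code in the middle of text.'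
--     >>> compile_code_inline('This is inline code: `1+2`')
--     'This is inline code: <code>1+2</code>'
--     >>> compile_code_inline('`1+2`')
--     '<code>1+2</code>'
--     >>> compile_code_inline('This example has html within the code: `<b>bold!</b>`')
--     'This example has html within the code: <code>&lt;b&gt;bold!&lt;/b&gt;</code>'
--     >>> compile_code_inline('This example has a math formula in the  code: `1 + 2 < 4`')
--     'This example has a math formula in the  code: <code>1 + 2 &lt; 4</code>'
--     >>> compile_code_inline('```')
--     '```'
--     >>> compile_code_inline('```python3')
--     '```python3'
--     '''
--     start_index = None
--     stop_index = None
--     for i in range(len(line)):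
--         if line[i:i+3] == '```':
--             return line
--         if line[i] == '`':
--             if start_index == None:
--                 start_index = i
--             else:
--                 stop_index = i
--     if start_index is not None and stop_index is not None:
--         new_line = line[:start_index] + '<code>' + line[start_index+1:stop_index] + '</code>' + line[stop_index+1:]
--     else:
--         new_line = line
--
--     return new_line
-- ===== SOURCE B (Python) =====
-- def compile_code_inline(line):
--     if '```' in line:
--         return line
--     parts = line.split('`')
--     if len(parts) >= 3:
--         return parts[0] + '<code>' + '`'.join(parts[1:-1]) + '</code>' + parts[-1]
--     return line
-- ===== Notes on version B (the rewrite author's own statement) =====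
-- stated objective: simpler
-- what changed: A hunts the first and last backtick with a Python index loop over the string (comparing a 3-char slice at every position and tracking start/stop state); B splits the line on the backtick character once and reconstructs it as first-part + <code> + re-joined inner parts + </code> + last-part.
import Mathlib
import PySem

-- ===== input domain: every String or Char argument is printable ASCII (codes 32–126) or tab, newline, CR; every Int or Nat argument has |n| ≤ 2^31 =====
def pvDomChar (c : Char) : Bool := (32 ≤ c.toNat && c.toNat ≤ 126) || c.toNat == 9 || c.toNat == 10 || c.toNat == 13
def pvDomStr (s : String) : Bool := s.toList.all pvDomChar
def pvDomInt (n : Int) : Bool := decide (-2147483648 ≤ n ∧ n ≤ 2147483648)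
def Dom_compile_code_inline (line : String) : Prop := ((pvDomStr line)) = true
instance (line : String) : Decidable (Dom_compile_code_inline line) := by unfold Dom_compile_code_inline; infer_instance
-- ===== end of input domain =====

-- B replaces A's index loop (first/last backtick found by hand with slice comparisons at
-- every position) by one split-on-backtick and a re-join; objective: simpler (and the
-- timing run measured B faster — C-level str.split vs a per-index Python loop).

-- ===== PORT A =====
-- A's 'for i in range(len(line))' walked as structural recursion over the remaining
-- suffix (= line[i:]), carrying the index i and the start/stop loop state;
-- 'line[i:i+3]' is '(line[i:]).take 3' and 'line[i]' is its head (exact: 0 ≤ i < len).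
-- 'none' = A's early 'return line'; 'some (st, sp)' = the loop fell through with that state.
def pvALoop : List Char → Nat → Option Nat → Option Nat → Option (Option Nat × Option Nat)
  | [], _, st, sp => some (st, sp)
  | c :: rest, i, st, sp =>
    if (c :: rest).take 3 = ['`', '`', '`'] then none
    else if c = '`' then
      match st with
      | none => pvALoop rest (i + 1) (some i) sp
      | some _ => pvALoop rest (i + 1) st (some i)
    else pvALoop rest (i + 1) st sp

def compile_code_inline (line : String) : String :=
  match pvALoop line.toList 0 none none with
  | none => line
  | some (st, sp) =>
    match st, sp with
    | some s, some p =>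
      -- line[:s] + '<code>' + line[s+1:p] + '</code>' + line[p+1:]  (0 ≤ s < p < len: take/drop are exact)
      String.ofList (line.toList.take s ++ "<code>".toList ++ ((line.toList.take p).drop (s + 1))
        ++ "</code>".toList ++ line.toList.drop (p + 1))
    | _, _ => line

-- ===== PORT B =====
-- Source B: guard on '```' in line, split on '`', re-join the inner pieces.
-- Python's line.split('`') (single-character separator) is exactly List.splitOn '`' on the
-- characters, and '`'.join(…) is List.intercalate ['`'].
def compile_code_inline_alt (line : String) : String :=
  if PySem.Str.isIn "```" line then line
  else
    let parts := line.toList.splitOn '`'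
    if 3 ≤ parts.length then
      String.ofList (parts.headI ++ "<code>".toList ++ List.intercalate ['`'] ((parts.drop 1).dropLast)
        ++ "</code>".toList ++ parts.getLastD [])
    else line

-- ===== PRECONDITION & SPEC =====
def Spec_compile_code_inline (line : String) (out : String) : Prop := out = compile_code_inline_alt line
instance (line : String) (out : String) : Decidable (Spec_compile_code_inline line out) := by unfold Spec_compile_code_inline; infer_instance

-- ===== CLAIM (what is proved, stated in full; the proofs are below) =====
def Claim_equal_compile_code_inline : Prop := ∀ (line : String), Dom_compile_code_inline line → Spec_compile_code_inline line (compile_code_inline line)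

-- ===== LEMMAS AND PROOFS =====

-- '```' as a list literal
def pvT : List Char := ['`', '`', '`']

lemma pv_take3_triple_iff (l : List Char) : l.take 3 = pvT ↔ pvT <+: l := by
  constructor
  · intro h; rw [← h]; exact List.take_prefix _ _
  · intro h; exact (List.prefix_iff_eq_take.mp h).symm

-- A's loop returns 'none' (early return) whenever '```' occurs in the remaining suffix
lemma pv_loop_of_infix (cs : List Char) : ∀ i st sp, pvT <:+: cs → pvALoop cs i st sp = none := by
  induction cs with
  | nil => intro i st sp h; simp [pvT] at h
  | cons c rest ih =>
    intro i st sp h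
    by_cases h3 : (c :: rest).take 3 = pvT
    · simp [pvALoop, pvT] at h3 ⊢; simp [h3]
    · have h' : pvT <:+: rest := by
        rcases List.infix_cons_iff.mp h with hp | hi
        · exact absurd ((pv_take3_triple_iff _).mpr hp) h3
        · exact hi
      have h3' : ¬ ((c :: rest).take 3 = ['`', '`', '`']) := h3
      simp only [pvALoop, if_neg h3']
      by_cases hc : c = '`'
      · cases st <;> simp [hc, ih _ _ _ h']
      · simp [hc, ih _ _ _ h']

-- the loop walks over a backtick-free prefix without touching its state
lemma pv_loop_skip (p : List Char) (hp : '`' ∉ p) :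
    ∀ rest i st sp, pvALoop (p ++ rest) i st sp = pvALoop rest (i + p.length) st sp := by
  induction p with
  | nil => intro rest i st sp; simp
  | cons c p' ih =>
    intro rest i st sp
    have hc : ¬ c = '`' := fun h => hp (by simp [h])
    have hp' : '`' ∉ p' := fun h => hp (by simp [h])
    have h3 : ¬ ((c :: (p' ++ rest)).take 3 = ['`', '`', '`']) := by
      intro h
      have := congrArg List.head? h
      simp at this
      exact hc this
    simp only [List.cons_append, pvALoop, if_neg h3, if_neg hc]
    rw [ih hp' rest (i + 1) st sp]
    simp only [List.length_cons]
    congr 1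
    omega

-- over a backtick-free list the loop just returns its state
lemma pv_loop_no_bt (r : List Char) (hr : '`' ∉ r) (i : Nat) (st sp : Option Nat) :
    pvALoop r i st sp = some (st, sp) := by
  have h := pv_loop_skip r hr [] i st sp
  simpa [pvALoop] using h

-- after the first backtick, the loop records the LAST backtick as stop_index
lemma pv_loop_last (r : List Char) (hr : '`' ∉ r) :
    ∀ (m : List Char), ¬ (pvT <:+: (m ++ '`' :: r)) →
      ∀ j s sp, pvALoop (m ++ '`' :: r) j (some s) sp = some (some s, some (j + m.length)) := by
  intro m
  induction m with
  | nil =>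
    intro h j s sp
    have h3 : ¬ (('`' :: r).take 3 = ['`', '`', '`']) := by
      intro hp
      exact h (List.IsPrefix.isInfix ((pv_take3_triple_iff _).mp hp))
    simp only [List.nil_append, pvALoop, if_neg h3]
    rw [pv_loop_no_bt r hr]
    simp
  | cons c m' ih =>
    intro h j s sp
    have hi' : ¬ (pvT <:+: (m' ++ '`' :: r)) := by
      intro hi
      exact h (by simpa using List.infix_cons_iff.mpr (Or.inr hi))
    have h3 : ¬ ((c :: (m' ++ '`' :: r)).take 3 = ['`', '`', '`']) := by
      intro hp
      exact h (by simpa using List.IsPrefix.isInfix ((pv_take3_triple_iff _).mp hp))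
    have harith : j + 1 + m'.length = j + (c :: m').length := by simp; omega
    by_cases hc : c = '`'
    · subst hc
      simp only [List.cons_append, pvALoop, if_neg h3]
      rw [ih hi' (j + 1) s (some j), harith]
      simp
    · simp only [List.cons_append, pvALoop, if_neg h3, if_neg hc]
      rw [ih hi' (j + 1) s sp, harith]

-- decompositions at the first / last backtick
lemma pv_first_split {cs : List Char} (h : '`' ∈ cs) :
    ∃ p q, cs = p ++ '`' :: q ∧ '`' ∉ p := by
  induction cs with
  | nil => simp at h
  | cons c rest ih =>
    by_cases hc : c = '`'
    · exact ⟨[], rest, by simp [hc], by simp⟩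
    · have : '`' ∈ rest := by
        rcases List.mem_cons.mp h with h1 | h1
        · exact absurd h1.symm hc
        · exact h1
      obtain ⟨p, q, h1, h2⟩ := ih this
      exact ⟨c :: p, q, by simp [h1], by
        intro hm
        rcases List.mem_cons.mp hm with h1 | h1
        · exact hc h1.symm
        · exact h2 h1⟩

lemma pv_last_split {q : List Char} (h : '`' ∈ q) :
    ∃ m r, q = m ++ '`' :: r ∧ '`' ∉ r := by
  have h' : '`' ∈ q.reverse := by simpa using h
  obtain ⟨p, t, h1, h2⟩ := pv_first_split h'
  refine ⟨t.reverse, p.reverse, ?_, by simpa using h2⟩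
  have h3 := congrArg List.reverse h1
  simp at h3
  rw [h3]

-- List.splitOn facts (single-character separator)
lemma pv_splitOn_no (p : List Char) (hp : '`' ∉ p) : p.splitOn '`' = [p] := by
  unfold List.splitOn
  exact List.splitOnP_eq_single _ p (fun x hx => by simp; rintro rfl; exact hp hx)

lemma pv_splitOn_cons_bt (l : List Char) : ('`' :: l).splitOn '`' = [] :: l.splitOn '`' := by
  unfold List.splitOn; rw [List.splitOnP_cons]; simp

lemma pv_splitOn_cons_ne (c : Char) (l : List Char) (h : ¬ c = '`') :
    (c :: l).splitOn '`' = (l.splitOn '`').modifyHead (c :: ·) := by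
  unfold List.splitOn; rw [List.splitOnP_cons]; simp [h]

lemma pv_splitOn_ne_nil (l : List Char) : l.splitOn '`' ≠ [] := by
  unfold List.splitOn; exact List.splitOnP_ne_nil _ _

lemma pv_splitOn_first (p : List Char) (hp : '`' ∉ p) :
    ∀ q, (p ++ '`' :: q).splitOn '`' = p :: q.splitOn '`' := by
  induction p with
  | nil => intro q; simpa using pv_splitOn_cons_bt q
  | cons c p' ih =>
    intro q
    have hc : ¬ c = '`' := fun h => hp (by simp [h])
    have hp' : '`' ∉ p' := fun h => hp (by simp [h])
    rw [List.cons_append, pv_splitOn_cons_ne c _ hc, ih hp' q]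
    simp [List.modifyHead]

lemma pv_splitOn_last (r : List Char) (hr : '`' ∉ r) :
    ∀ m, (m ++ '`' :: r).splitOn '`' = m.splitOn '`' ++ [r] := by
  intro m
  induction m with
  | nil =>
    rw [List.nil_append, pv_splitOn_cons_bt, pv_splitOn_no r hr]
    simp [pv_splitOn_no [] (by simp)]
  | cons c m' ih =>
    by_cases hc : c = '`'
    · subst hc
      rw [List.cons_append, pv_splitOn_cons_bt, ih, pv_splitOn_cons_bt]
      simp
    · rw [List.cons_append, pv_splitOn_cons_ne c _ hc, ih, pv_splitOn_cons_ne c _ hc]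
      cases hsp : m'.splitOn '`' with
      | nil => exact absurd hsp (pv_splitOn_ne_nil m')
      | cons x xs => simp [List.modifyHead]

lemma pv_triple_toList : ("```" : String).toList = pvT := rfl

-- ===== VERDICT (by name: the statement is the Claim_ definition above) =====
theorem compile_code_inline_spec : Claim_equal_compile_code_inline := by
  intro line _
  unfold Spec_compile_code_inline
  by_cases hin : pvT <:+: line.toList
  · -- '```' occurs: both return the line unchanged
    have hA : compile_code_inline line = line := by
      unfold compile_code_inline
      rw [pv_loop_of_infix _ 0 none none hin]
    have hB : compile_code_inline_alt line = line := by
      unfold compile_code_inline_alt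
      have : PySem.Str.isIn "```" line = true := by
        rw [PySem.Str.isIn_iff_infix, pv_triple_toList]; exact hin
      rw [this]; simp
    rw [hA, hB]
  · have hBnot : PySem.Str.isIn "```" line = false := by
      rw [← Bool.not_eq_true, PySem.Str.isIn_iff_infix, pv_triple_toList]; exact hin
    by_cases hmem : '`' ∈ line.toList
    · obtain ⟨p, q, hcs, hp⟩ := pv_first_split hmem
      by_cases hmq : '`' ∈ q
      · -- at least two backticks: both rebuild the line
        obtain ⟨m, r, hq, hr⟩ := pv_last_split hmq
        rw [hq] at hcs
        have hA : compile_code_inline line = String.ofList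
            (p ++ "<code>".toList ++ m ++ "</code>".toList ++ r) := by
          unfold compile_code_inline
          rw [hcs, pv_loop_skip p hp]
          have hnotin : ¬ (pvT <:+: ('`' :: (m ++ '`' :: r))) := by
            rw [hcs] at hin
            exact fun hi => hin (hi.trans (List.suffix_append p _).isInfix)
          have h3 : ¬ (('`' :: (m ++ '`' :: r)).take 3 = ['`', '`', '`']) := by
            intro hp3
            exact hnotin (List.IsPrefix.isInfix ((pv_take3_triple_iff _).mp hp3))
          simp only [pvALoop, if_neg h3, Nat.zero_add]
          have hnotin' : ¬ (pvT <:+: (m ++ '`' :: r)) := by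
            intro hi
            exact hnotin (by simpa using List.infix_cons_iff.mpr (Or.inr hi))
          rw [pv_loop_last r hr m hnotin' (p.length + 1) p.length none]
          show String.ofList ((p ++ '`' :: (m ++ '`' :: r)).take p.length ++ "<code>".toList
              ++ ((p ++ '`' :: (m ++ '`' :: r)).take (p.length + 1 + m.length)).drop (p.length + 1)
              ++ "</code>".toList ++ (p ++ '`' :: (m ++ '`' :: r)).drop (p.length + 1 + m.length + 1)) = _
          have ht1 : (p ++ '`' :: (m ++ '`' :: r)).take p.length = p :=
            List.take_left' rfl
          have ht2 : (p ++ '`' :: (m ++ '`' :: r)).take (p.length + 1 + m.length) = p ++ '`' :: m := by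
            have : p ++ '`' :: (m ++ '`' :: r) = (p ++ '`' :: m) ++ '`' :: r := by simp
            rw [this]
            exact List.take_left' (by simp; omega)
          have ht3 : (p ++ '`' :: (m ++ '`' :: r)).drop (p.length + 1 + m.length + 1) = r := by
            have : p ++ '`' :: (m ++ '`' :: r) = (p ++ '`' :: m ++ ['`']) ++ r := by simp
            rw [this]
            exact List.drop_left' (by simp; omega)
          have ht4 : (p ++ '`' :: m).drop (p.length + 1) = m := by
            have : p ++ '`' :: m = (p ++ ['`']) ++ m := by simp
            rw [this]
            exact List.drop_left' (by simp)
          rw [ht1, ht2, ht3, ht4]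
        have hB : compile_code_inline_alt line = String.ofList
            (p ++ "<code>".toList ++ m ++ "</code>".toList ++ r) := by
          unfold compile_code_inline_alt
          rw [hBnot, if_neg Bool.false_ne_true]
          rw [hcs, pv_splitOn_first p hp, pv_splitOn_last r hr m]
          have hlen : 3 ≤ (p :: (m.splitOn '`' ++ [r])).length := by
            have := pv_splitOn_ne_nil m
            have : 1 ≤ (m.splitOn '`').length := List.length_pos_iff.mpr this
            simp; omega
          rw [if_pos hlen]
          simp only [List.headI, List.drop_one, List.tail_cons, List.dropLast_concat]
          rw [List.intercalate_splitOn m '`']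
          congr 1
          rw [show (p :: (m.splitOn '`' ++ [r])) = ((p :: m.splitOn '`') ++ [r] : List (List Char)) from rfl,
            List.getLastD_concat]
        rw [hA, hB]
      · -- exactly one backtick: both return the line unchanged
        have hA : compile_code_inline line = line := by
          unfold compile_code_inline
          rw [hcs, pv_loop_skip p hp]
          have hnotin : ¬ (pvT <:+: ('`' :: q)) := by
            rw [hcs] at hin
            exact fun hi => hin (hi.trans (List.suffix_append p _).isInfix)
          have h3 : ¬ (('`' :: q).take 3 = ['`', '`', '`']) := by
            intro hp3
            exact hnotin (List.IsPrefix.isInfix ((pv_take3_triple_iff _).mp hp3))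
          simp only [pvALoop, if_neg h3, Nat.zero_add]
          rw [pv_loop_no_bt q hmq]
          simp
        have hB : compile_code_inline_alt line = line := by
          unfold compile_code_inline_alt
          rw [hBnot, if_neg Bool.false_ne_true]
          rw [hcs, pv_splitOn_first p hp, pv_splitOn_no q hmq]
          simp
        rw [hA, hB]
    · -- no backtick at all
      have hA : compile_code_inline line = line := by
        unfold compile_code_inline
        rw [pv_loop_no_bt _ hmem]
      have hB : compile_code_inline_alt line = line := by
        unfold compile_code_inline_alt
        rw [hBnot, if_neg Bool.false_ne_true]
        rw [pv_splitOn_no _ hmem]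
        simp
      rw [hA, hB]
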